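-- pv_equiv track=rewrite | github.com/AryanBogam/Python-Challenge | day_35/problem_10/solution.py | count_people
-- ===== SOURCE A (Python) =====
-- def count_people(events):
--     count = 0
--     for event in events:
--         if event == "enter":
--             count += 1
--         elif event == "exit":
--             count -= 1
--
--     return count
-- ===== SOURCE B (Python) =====
-- DELTA = {"enter": 1, "exit": -1}
--
-- def count_people(events):
--     # divide-and-conquer: net change of a range is the sum of its halves' nets
--     def net(lo, hi):
--         if hi - lo == 1:
--             return DELTA.get(events[lo], 0)
--         if lo >= hi:
--             return 0
--         mid = (lo + hi) // 2
--         return net(lo, mid) + net(mid, hi)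
--     return net(0, len(events))
-- ===== Notes on version B (the rewrite author's own statement) =====
-- stated objective: alternative
-- what changed: Replaced the single-pass branching accumulator with a divide-and-conquer recursion that splits the index range in half, maps each single event through a delta table, and sums the two halves' nets.
import Mathlib
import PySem

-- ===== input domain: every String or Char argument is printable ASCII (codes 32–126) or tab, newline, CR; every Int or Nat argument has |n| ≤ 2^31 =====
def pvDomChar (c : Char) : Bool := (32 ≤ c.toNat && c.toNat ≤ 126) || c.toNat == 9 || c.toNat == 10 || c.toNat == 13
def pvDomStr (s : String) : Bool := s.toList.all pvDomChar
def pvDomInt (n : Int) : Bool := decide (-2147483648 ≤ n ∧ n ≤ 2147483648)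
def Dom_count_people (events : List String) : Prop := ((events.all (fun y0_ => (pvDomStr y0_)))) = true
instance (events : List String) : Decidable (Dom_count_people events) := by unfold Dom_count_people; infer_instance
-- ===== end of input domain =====

-- B replaces A's single-pass branching accumulator with a divide-and-conquer recursion over the index range (delta-table per element, halves summed); objective: alternative, same cost.
-- ===== PORT A =====
def count_people (events : List String) : Int :=
  events.foldl (fun count event =>
    if event == "enter" then count + 1
    else if event == "exit" then count - 1
    else count) 0

-- ===== PORT B =====
-- delta table lookup: DELTA.get(e, 0)
def pvDelta (e : String) : Int :=
  (PySem.Dict.ofList [("enter", (1 : Int)), ("exit", (-1 : Int))]).getD e 0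

-- net(lo, hi) from Source B: divide-and-conquer over the index range
def pvNet (events : List String) (lo hi : Nat) : Int :=
  if hi - lo = 1 then pvDelta (events.getD lo "")
  else if lo ≥ hi then 0
  else pvNet events lo ((lo + hi) / 2) + pvNet events ((lo + hi) / 2) hi
termination_by hi - lo
decreasing_by all_goals omega

def count_people_alt (events : List String) : Int :=
  pvNet events 0 events.length

-- ===== PRECONDITION & SPEC =====
def Spec_count_people (events : List String) (out : Int) : Prop := out = count_people_alt events
instance (events : List String) (out : Int) : Decidable (Spec_count_people events out) := by unfold Spec_count_people; infer_instance

-- ===== CLAIM (what is proved, stated in full; the proofs are below) =====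
def Claim_equal_count_people : Prop := ∀ (events : List String), Dom_count_people events → Spec_count_people events (count_people events)

-- ===== LEMMAS AND PROOFS =====

-- ===== VERDICT (by name: the statement is the Claim_ definition above) =====
-- pvDelta as a plain conditional.
theorem pvDelta_eq (e : String) :
    pvDelta e = if e = "enter" then 1 else if e = "exit" then -1 else 0 := by
  simp only [pvDelta, PySem.Dict.ofList, PySem.Dict.update, List.foldl,
    PySem.Dict.getD_insert, PySem.Dict.getD_empty]
  split_ifs <;> simp_all

-- pvNet on [lo, hi) computes the delta-sum of the slice, provided hi ≤ length.
theorem pvNet_eq_sum (events : List String) (lo hi : Nat) (hhi : hi ≤ events.length) :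
    pvNet events lo hi = (((events.drop lo).take (hi - lo)).map pvDelta).sum := by
  by_cases hlh : lo ≥ hi
  · have h0 : hi - lo = 0 := by omega
    unfold pvNet
    by_cases h1 : hi - lo = 1 <;> simp_all
  · replace hlh : lo < hi := by omega
    by_cases h1 : hi - lo = 1
    · unfold pvNet
      have hlt : lo < events.length := by omega
      rw [if_pos h1, h1]
      rw [List.drop_eq_getElem_cons hlt]
      simp [List.getD_eq_getElem?_getD, hlt]
    · unfold pvNet
      rw [if_neg h1, if_neg (by omega)]
      set mid := (lo + hi) / 2 with hm
      have hlm : lo < mid := by omega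
      have hmh : mid < hi := by omega
      rw [pvNet_eq_sum events lo mid (by omega), pvNet_eq_sum events mid hi (by omega)]
      have hadd : hi - lo = (mid - lo) + (hi - mid) := by omega
      rw [hadd, List.take_add, List.drop_drop]
      have h2 : lo + (mid - lo) = mid := by omega
      rw [h2]
      simp
termination_by hi - lo
decreasing_by all_goals omega

-- A's fold from any accumulator adds the delta-sum of the whole list.
theorem count_people_fold (events : List String) (a : Int) :
    events.foldl (fun count event =>
      if event == "enter" then count + 1
      else if event == "exit" then count - 1
      else count) a = a + (events.map pvDelta).sum := by
  induction events generalizing a with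
  | nil => simp
  | cons e es ih =>
    simp only [List.foldl_cons, ih, List.map_cons, List.sum_cons, pvDelta_eq]
    by_cases h1 : e == "enter"
    · simp_all; ring
    · by_cases h2 : e == "exit"
      · simp_all; ring
      · simp_all

theorem count_people_spec : Claim_equal_count_people := by
  intro events _
  unfold Spec_count_people count_people count_people_alt
  rw [pvNet_eq_sum events 0 events.length le_rfl, count_people_fold]
  simp
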